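-- pv_equiv track=rewrite | github.com/nwrousell/dimspector | tests/programs/correct/ir.py | while_with_if
-- ===== SOURCE A (Python) =====
-- def while_with_if(n):
--     i = 0
--     while i < n:
--         if i % 2 == 0:
--             i = i + 2
--         else:
--             i = i + 1
--     return i
-- ===== SOURCE B (Python) =====
-- def while_with_if(n):
--     # closed form: smallest even number >= n (0 if n <= 0)
--     if n <= 0:
--         return 0
--     return ((n + 1) // 2) * 2
-- ===== Notes on version B (the rewrite author's own statement) =====
-- stated objective: faster
-- what changed: Replaces the counting loop with the closed form ((n+1)//2)*2 (0 for n<=0): smallest even number >= n.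
import Mathlib
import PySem

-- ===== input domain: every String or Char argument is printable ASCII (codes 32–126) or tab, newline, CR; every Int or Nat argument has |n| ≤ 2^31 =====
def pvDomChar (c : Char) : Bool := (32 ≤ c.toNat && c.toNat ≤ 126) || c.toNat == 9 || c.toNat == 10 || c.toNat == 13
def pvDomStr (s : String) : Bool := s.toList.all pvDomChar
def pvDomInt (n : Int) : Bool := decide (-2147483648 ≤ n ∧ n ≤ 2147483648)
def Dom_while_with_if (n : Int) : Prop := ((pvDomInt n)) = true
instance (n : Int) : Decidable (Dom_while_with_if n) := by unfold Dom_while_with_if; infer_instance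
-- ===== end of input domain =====

-- B replaces A's O(n) counting loop with the O(1) closed form ((n+1)//2)*2 (0 for n<=0).


-- ===== PORT A =====
-- the while loop of A: state is i; branches in the same order as the Python
def whileWithIfLoop (n i : Int) : Int :=
  if _h : i < n then
    if PySem.Int.mod i 2 = 0 then whileWithIfLoop n (i + 2)
    else whileWithIfLoop n (i + 1)
  else i
termination_by (n - i).toNat
decreasing_by all_goals omega

def while_with_if (n : Int) : Int := whileWithIfLoop n 0

-- ===== PORT B =====
def while_with_if_alt (n : Int) : Int :=
  if n ≤ 0 then 0 else (PySem.Int.floordiv (n + 1) 2) * 2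

-- ===== PRECONDITION & SPEC =====
def Spec_while_with_if (n : Int) (out : Int) : Prop := out = while_with_if_alt n
instance (n : Int) (out : Int) : Decidable (Spec_while_with_if n out) := by unfold Spec_while_with_if; infer_instance

-- ===== CLAIM (what is proved, stated in full; the proofs are below) =====
def Claim_equal_while_with_if : Prop := ∀ (n : Int), Dom_while_with_if n → Spec_while_with_if n (while_with_if n)

-- ===== LEMMAS AND PROOFS =====

-- from an even state i, the loop returns i if n ≤ i, else the smallest even number ≥ n
theorem whileWithIfLoop_even (n i : Int) (h : i % 2 = 0) :
    whileWithIfLoop n i = if i < n then (PySem.Int.floordiv (n + 1) 2) * 2 else i := by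
  generalize hk : (n - i).toNat = k
  induction k using Nat.strong_induction_on generalizing i with
  | _ k ih =>
    rw [whileWithIfLoop]
    by_cases hlt : i < n
    · have hk2 : (n - (i + 2)).toNat < k := by omega
      have hmod : PySem.Int.mod i 2 = 0 := by
        rw [PySem.Int.mod_eq_emod_of_pos (by omega)]; exact h
      rw [dif_pos hlt, if_pos hmod, ih _ hk2 (i + 2) (by omega) rfl]
      by_cases h2 : i + 2 < n
      · simp [h2, hlt]
      · have hE : PySem.Int.floordiv (n + 1) 2 = (n + 1) / 2 :=
          PySem.Int.floordiv_eq_ediv_of_pos (by omega)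
        simp only [if_neg h2, if_pos hlt, hE]
        omega
    · simp [hlt]

-- ===== VERDICT (by name: the statement is the Claim_ definition above) =====
theorem while_with_if_spec : Claim_equal_while_with_if := by
  intro n _
  unfold Spec_while_with_if while_with_if while_with_if_alt
  rw [whileWithIfLoop_even n 0 rfl]
  by_cases h : 0 < n
  · simp [h, show ¬ n ≤ 0 by omega]
  · simp [h, show n ≤ 0 by omega]
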